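-- pv_equiv track=rewrite | github.com/TimeNtWait/WhiteFang | Yandex_Algorithms_1_0/Task I/Task_I_2021.py | calc_side_block
-- ===== SOURCE A (Python) =====
-- def calc_side_block(a, b, c, d, e):
--     '''
--     входные данные
--     :a - сторона 1 убираемого блока
--     :b - сторона 1 убираемого блока
--     :с - сторона 3 убираемого блока
--     :d - сторона 1 отверстия
--     :e - сторона 2 отверстия
--
--     выходные данные
--     :is_drop_block - минимальное и максимальное время ожидания
--     '''
--     block_sizes = [sorted([a, b]), sorted([a, c]), sorted([b, c])]
--     hole_size = sorted([d, e])
--     is_drop_block = "NO"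
--     for side in block_sizes:
--         if (hole_size[0] - side[0]) >= 0 and (hole_size[1] - side[1]) >= 0:
--             is_drop_block = "YES"
--             break
--     return is_drop_block
-- ===== SOURCE B (Python) =====
-- def calc_side_block(a, b, c, d, e):
--     s = sorted([a, b, c])
--     h = sorted([d, e])
--     return "YES" if s[0] <= h[0] and s[1] <= h[1] else "NO"
-- ===== Notes on version B (the rewrite author's own statement) =====
-- stated objective: simpler
-- what changed: Replaces the enumerate-three-faces-and-test loop by one dominance comparison: sort all three block sides, the two smallest form the only face that needs checking against the sorted hole.
import Mathlib
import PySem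

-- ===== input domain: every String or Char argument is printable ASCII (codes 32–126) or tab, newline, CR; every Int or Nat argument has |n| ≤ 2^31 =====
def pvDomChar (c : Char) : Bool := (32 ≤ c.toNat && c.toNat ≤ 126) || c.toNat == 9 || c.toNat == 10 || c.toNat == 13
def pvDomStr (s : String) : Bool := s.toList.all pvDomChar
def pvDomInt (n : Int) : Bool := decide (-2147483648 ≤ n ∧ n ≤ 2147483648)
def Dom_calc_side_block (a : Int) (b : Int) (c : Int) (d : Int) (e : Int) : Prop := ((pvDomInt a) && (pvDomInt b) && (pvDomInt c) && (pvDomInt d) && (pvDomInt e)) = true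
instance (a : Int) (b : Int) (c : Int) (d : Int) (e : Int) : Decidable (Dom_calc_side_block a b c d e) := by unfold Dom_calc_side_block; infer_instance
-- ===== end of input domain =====

-- B replaces A's loop over the three block faces by a single dominance test on the
-- two smallest of the three sorted sides (objective: simpler).

-- ===== PORT A =====
-- the for-loop with break: first face that fits yields "YES", otherwise "NO";
-- hole_size[0]/[1] and side[0]/[1] are always in range (length-2 lists), so .getD 0 is exact
def pvLoopA (hole : List Int) : List (List Int) → String
  | [] => "NO"
  | side :: rest =>
    if (PySem.List.pyGet? hole 0).getD 0 - (PySem.List.pyGet? side 0).getD 0 ≥ 0 ∧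
       (PySem.List.pyGet? hole 1).getD 0 - (PySem.List.pyGet? side 1).getD 0 ≥ 0 then
      "YES"
    else
      pvLoopA hole rest

def calc_side_block (a : Int) (b : Int) (c : Int) (d : Int) (e : Int) : String :=
  let block_sizes := [PySem.List.sorted [a, b] (fun x => x) false,
                      PySem.List.sorted [a, c] (fun x => x) false,
                      PySem.List.sorted [b, c] (fun x => x) false]
  let hole_size := PySem.List.sorted [d, e] (fun x => x) false
  pvLoopA hole_size block_sizes

-- ===== PORT B =====
def calc_side_block_alt (a : Int) (b : Int) (c : Int) (d : Int) (e : Int) : String :=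
  let s := PySem.List.sorted [a, b, c] (fun x => x) false
  let h := PySem.List.sorted [d, e] (fun x => x) false
  if (PySem.List.pyGet? s 0).getD 0 ≤ (PySem.List.pyGet? h 0).getD 0 ∧
     (PySem.List.pyGet? s 1).getD 0 ≤ (PySem.List.pyGet? h 1).getD 0 then
    "YES"
  else
    "NO"

-- ===== PRECONDITION & SPEC =====
def Spec_calc_side_block (a : Int) (b : Int) (c : Int) (d : Int) (e : Int) (out : String) : Prop := out = calc_side_block_alt a b c d e
instance (a : Int) (b : Int) (c : Int) (d : Int) (e : Int) (out : String) : Decidable (Spec_calc_side_block a b c d e out) := by unfold Spec_calc_side_block; infer_instance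

-- ===== CLAIM (what is proved, stated in full; the proofs are below) =====
def Claim_equal_calc_side_block : Prop := ∀ (a : Int) (b : Int) (c : Int) (d : Int) (e : Int), Dom_calc_side_block a b c d e → Spec_calc_side_block a b c d e (calc_side_block a b c d e)

-- ===== LEMMAS AND PROOFS =====

theorem sorted_pair (x y : Int) :
    PySem.List.sorted [x, y] (fun x => x) false = if x ≤ y then [x, y] else [y, x] := by
  split_ifs with h
  · exact PySem.List.sorted_id_eq_of_perm_of_pairwise _ _ (List.Perm.refl _)
      (by simp [List.pairwise_cons]; omega)
  · exact PySem.List.sorted_id_eq_of_perm_of_pairwise _ _ (List.Perm.swap x y [])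
      (by simp [List.pairwise_cons]; omega)

theorem sorted_triple (x y z : Int) :
    PySem.List.sorted [x, y, z] (fun x => x) false =
      if x ≤ y then
        if y ≤ z then [x, y, z] else if x ≤ z then [x, z, y] else [z, x, y]
      else
        if x ≤ z then [y, x, z] else if y ≤ z then [y, z, x] else [z, y, x] := by
  split_ifs with h1 h2 h3 h4 h5 <;>
    refine PySem.List.sorted_id_eq_of_perm_of_pairwise _ _ ?_
      (by simp [List.pairwise_cons]; omega)
  · exact List.Perm.refl _
  · exact List.Perm.cons x (List.Perm.swap y z [])
  · exact (List.Perm.swap x z [y]).trans (List.Perm.cons x (List.Perm.swap y z []))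
  · exact List.Perm.swap x y [z]
  · exact (List.Perm.cons y (List.Perm.swap x z [])).trans (List.Perm.swap x y [z])
  · exact ((List.Perm.swap y z [x]).trans (List.Perm.cons y (List.Perm.swap x z []))).trans
      (List.Perm.swap x y [z])

-- ===== VERDICT (by name: the statement is the Claim_ definition above) =====
set_option maxHeartbeats 1000000 in
theorem calc_side_block_spec : Claim_equal_calc_side_block := by
  intro a b c d e _
  unfold Spec_calc_side_block calc_side_block calc_side_block_alt
  simp only [sorted_pair, sorted_triple]
  split_ifs <;>
    simp_all [pvLoopA, PySem.List.pyGet?, PySem.List.pyIdx?] <;>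
    first
      | omega
      | (split_ifs <;> simp_all <;> omega)
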